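-- pv_equiv track=rewrite | github.com/tarunrajput/Data-Structures-and-Algorithms | Company-Wise-Questions/Nagarro/loveletter.py | loveletter
-- ===== SOURCE A (Python) =====
-- def loveletter(input1,input2):
--     words = []
--     temp=""
--     for i in range(0,len(input1)):
--         if(input1[i].isalpha()):
--             temp += input1[i]
--         else:
--             words.append(temp)
--             temp = ""
--     if(temp!=""):
--         words.append(temp)
--
--     ans=0
--
--     for word in words:
--         temp=word
--         for _ in range(0,input2):
--             temp=temp[1:] + temp[0]
--         if(temp==word):
--             ans+=1
--     return ans
-- ===== SOURCE B (Python) =====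
-- def loveletter(input1, input2):
--     # Split on non-letter boundaries by recording segment start indices and slicing,
--     # then test each word's rotation with one O(n) slice comparison instead of
--     # rotating it input2 times character by character.
--     segs = []
--     start = 0
--     for i, c in enumerate(input1):
--         if not c.isalpha():
--             segs.append(input1[start:i])
--             start = i + 1
--     tail = input1[start:]
--     if tail != "":
--         segs.append(tail)
--     ans = 0
--     for w in segs:
--         n = len(w)
--         if input2 > 0 and n > 0:
--             k = input2 % n
--             if w[k:] + w[:k] == w:
--                 ans += 1
--         else:
--             ans += 1
--     return ans
-- ===== Notes on version B (the rewrite author's own statement) =====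
-- stated objective: faster
-- what changed: B tests each word with a single O(n) slice comparison w[input2 % n:] + w[:input2 % n] == w instead of rotating it one character at a time input2 times, and splits the input by recording segment boundary indices and slicing instead of accumulating characters one by one.
-- outside the precondition, e.g. on loveletter(', ab', 1): A raises IndexError, B returns 2
-- crash fix: When input2 >= 1 and the string starts with a non-letter or has two adjacent non-letters, A's word list contains an empty word and temp[0] raises IndexError; B returns the count treating the empty word as unchanged by rotation. — e.g. on loveletter(", ab", 1): A raises IndexError, B returns 2
import Mathlib
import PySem

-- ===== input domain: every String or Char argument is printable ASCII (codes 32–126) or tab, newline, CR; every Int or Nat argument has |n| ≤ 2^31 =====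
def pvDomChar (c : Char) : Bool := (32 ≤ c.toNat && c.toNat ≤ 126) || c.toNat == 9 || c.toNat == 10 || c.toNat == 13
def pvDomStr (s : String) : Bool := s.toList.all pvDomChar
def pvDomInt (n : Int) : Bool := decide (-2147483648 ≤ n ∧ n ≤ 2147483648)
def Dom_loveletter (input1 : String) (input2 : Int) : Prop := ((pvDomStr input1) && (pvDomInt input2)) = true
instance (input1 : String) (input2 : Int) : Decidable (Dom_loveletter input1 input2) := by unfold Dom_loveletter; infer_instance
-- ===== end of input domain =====

-- B replaces A's per-word repeated one-step rotation (input2 string rotations per word)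
-- by a single slice comparison with k = input2 % len(word), and splits the input by
-- boundary indices + slicing instead of char-by-char accumulation (objective: faster).


-- ===== PORT A =====
def loveletter (input1 : String) (input2 : Int) : Int :=
  let cs := input1.toList
  let st := (PySem.List.pyRange 0 (PySem.Str.len input1) 1).foldl
      (fun (st : List (List Char) × List Char) i =>
        let c := PySem.List.pyGetD cs i ' '
        if PySem.Chars.isalpha c then (st.1, st.2 ++ [c]) else (st.1 ++ [st.2], []))
      ([], [])
  let words := if st.2 ≠ [] then st.1 ++ [st.2] else st.1
  words.foldl (fun ans w =>
      let t := (PySem.List.pyRange 0 input2 1).foldl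
        (fun (t : List Char) (_ : Int) =>
          match PySem.List.pyGet? t 0 with
          | some c => PySem.List.slice t (some 1) none ++ [c]
          | none => t) w           -- temp[0] on empty temp is an IndexError in Python (outside Pre_)
      if t = w then ans + 1 else ans) 0

-- ===== PORT B =====
def loveletter_alt (input1 : String) (input2 : Int) : Int :=
  let cs := input1.toList
  let st := (PySem.List.enumerate cs 0).foldl
      (fun (st : List (List Char) × Int) ic =>
        if PySem.Chars.isalpha ic.2 then st
        else (st.1 ++ [PySem.List.slice cs (some st.2) (some ic.1)], ic.1 + 1))
      ([], 0)
  let tail := PySem.List.slice cs (some st.2) none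
  let segs := if tail ≠ [] then st.1 ++ [tail] else st.1
  segs.foldl (fun ans w =>
      let n : Int := w.length
      if 0 < input2 ∧ 0 < n then
        let k := PySem.Int.mod input2 n
        if PySem.List.slice w (some k) none ++ PySem.List.slice w none (some k) = w then ans + 1
        else ans
      else ans + 1) 0

-- ===== PRECONDITION & SPEC =====
-- adjacent pair of non-letters somewhere in the list
def pvBadAdj : List Char → Bool
  | [] => false
  | [_] => false
  | a :: b :: rest => (!PySem.Chars.isalpha a && !PySem.Chars.isalpha b) || pvBadAdj (b :: rest)

-- true iff A's word list for this string contains no empty word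
def pvNoEmptyWord (cs : List Char) : Bool :=
  match cs with
  | [] => true
  | c :: _ => PySem.Chars.isalpha c && !pvBadAdj cs

-- Pre_ excludes exactly the inputs on which A raises IndexError: a positive rotation
-- count together with an empty word (leading non-letter, or two adjacent non-letters).
def Pre_loveletter (input1 : String) (input2 : Int) : Prop :=
  0 < input2 → pvNoEmptyWord input1.toList = true
instance (input1 : String) (input2 : Int) : Decidable (Pre_loveletter input1 input2) := by
  unfold Pre_loveletter; infer_instance

def pvWitness_loveletter : String × Int := ("ab cba", 2)

-- A raises IndexError (temp[0] on an empty word) whenever input2 ≥ 1 and the string has a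
-- leading non-letter or two adjacent non-letters; B returns the count treating the empty
-- word as unchanged by rotation.
def Raises_loveletter (input1 : String) (input2 : Int) : Prop :=
  0 < input2 ∧ pvNoEmptyWord input1.toList = false
instance (input1 : String) (input2 : Int) : Decidable (Raises_loveletter input1 input2) := by
  unfold Raises_loveletter; infer_instance
def pvRaiseWitness_loveletter : String × Int := (", ab", 1)
def pvRaiseWitnessOut_loveletter : Int := 2

def Spec_loveletter (input1 : String) (input2 : Int) (out : Int) : Prop := out = loveletter_alt input1 input2
instance (input1 : String) (input2 : Int) (out : Int) : Decidable (Spec_loveletter input1 input2 out) := by unfold Spec_loveletter; infer_instance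

-- ===== CLAIM (what is proved, stated in full; the proofs are below) =====
def Claim_equal_loveletter : Prop := ∀ (input1 : String) (input2 : Int), Dom_loveletter input1 input2 → Pre_loveletter input1 input2 → Spec_loveletter input1 input2 (loveletter input1 input2)

def Claim_raises_loveletter : Prop := (∀ (input1 : String) (input2 : Int), Dom_loveletter input1 input2 → Raises_loveletter input1 input2 → ¬ Pre_loveletter input1 input2) ∧ (Dom_loveletter (pvRaiseWitness_loveletter.1) (pvRaiseWitness_loveletter.2) ∧ Raises_loveletter (pvRaiseWitness_loveletter.1) (pvRaiseWitness_loveletter.2) ∧ loveletter_alt (pvRaiseWitness_loveletter.1) (pvRaiseWitness_loveletter.2) = pvRaiseWitnessOut_loveletter)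

-- ===== LEMMAS AND PROOFS =====

-- reference splitter: completed segments and the trailing (still open) segment
def pvSegs (t : List Char) : List Char → List (List Char) × List Char
  | [] => ([], t)
  | c :: cs =>
    if PySem.Chars.isalpha c then pvSegs (t ++ [c]) cs
    else
      let r := pvSegs [] cs
      (t :: r.1, r.2)

-- A's word list, via the reference splitter
def pvWords (cs : List Char) : List (List Char) :=
  let r := pvSegs [] cs
  if r.2 ≠ [] then r.1 ++ [r.2] else r.1

theorem pvSegs_A_fold (cs : List Char) (ws : List (List Char)) (t : List Char) :
    cs.foldl (fun (st : List (List Char) × List Char) c =>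
        if PySem.Chars.isalpha c then (st.1, st.2 ++ [c]) else (st.1 ++ [st.2], []))
      (ws, t)
      = (ws ++ (pvSegs t cs).1, (pvSegs t cs).2) := by
  induction cs generalizing ws t with
  | nil => simp [pvSegs]
  | cons c cs ih =>
    by_cases h : PySem.Chars.isalpha c
    · simp [pvSegs, h, ih]
    · simp [pvSegs, h, ih]

theorem pvSlice_snoc (cs d' : List Char) (s p : Nat) (c : Char) (hsp : s ≤ p)
    (h : cs.drop p = c :: d') :
    PySem.List.slice cs (some (s : Int)) (some ((p : Int) + 1))
      = PySem.List.slice cs (some (s : Int)) (some (p : Int)) ++ [c] := by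
  have hc : cs[p]? = some c := by
    have h0 : (cs.drop p)[0]? = some c := by rw [h]; rfl
    rw [List.getElem?_drop] at h0
    simpa using h0
  rw [show ((p : Int) + 1) = (((p + 1 : Nat)) : Int) by push_cast; ring]
  rw [PySem.List.slice_natCast, PySem.List.slice_natCast]
  have hps : p + 1 - s = (p - s) + 1 := by omega
  rw [hps, List.take_add_one, List.getElem?_drop]
  rw [show s + (p - s) = p from by omega, hc]
  rfl

theorem pvSegs_B_fold (cs : List Char) : ∀ (d : List Char) (p s : Nat) (ss : List (List Char)),
    s ≤ p → d = cs.drop p →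
    (let st := (PySem.List.enumerate d (p : Int)).foldl
        (fun (st : List (List Char) × Int) ic =>
          if PySem.Chars.isalpha ic.2 then st
          else (st.1 ++ [PySem.List.slice cs (some st.2) (some ic.1)], ic.1 + 1))
        (ss, (s : Int));
      let tail := PySem.List.slice cs (some st.2) none
      (if tail ≠ [] then st.1 ++ [tail] else st.1))
      = (let r := pvSegs (PySem.List.slice cs (some (s : Int)) (some (p : Int))) d
         if r.2 ≠ [] then ss ++ r.1 ++ [r.2] else ss ++ r.1) := by
  intro d
  induction d with
  | nil =>
    intro p s ss hsp hd
    have hlen : cs.length ≤ p := by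
      have := congrArg List.length hd
      simp [List.length_drop] at this
      omega
    have htail : PySem.List.slice cs (some (s : Int)) none
        = PySem.List.slice cs (some (s : Int)) (some (p : Int)) := by
      rw [PySem.List.slice_from_natCast, PySem.List.slice_natCast]
      rw [List.take_of_length_le (by simp [List.length_drop]; omega)]
    simp only [PySem.List.enumerate, List.foldl_nil, pvSegs, htail]
    split <;> simp
  | cons c d' ih =>
    intro p s ss hsp hd
    have henum : PySem.List.enumerate (c :: d') (p : Int)
        = ((p : Int), c) :: PySem.List.enumerate d' ((p : Int) + 1) := by
      simp [PySem.List.enumerate]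
    have hcast : ((p : Int) + 1) = (((p + 1 : Nat)) : Int) := by push_cast; ring
    by_cases h : PySem.Chars.isalpha c
    · have hih := ih (p + 1) s ss (by omega) (by
        have := congrArg List.tail hd
        simpa [List.tail_drop] using this)
      have hsnoc := pvSlice_snoc cs d' s p c hsp hd.symm
      rw [henum]
      simp only [List.foldl_cons, h, if_true]
      rw [hcast, hih]
      rw [hcast] at hsnoc
      simp only [pvSegs, h, if_true, hsnoc]
    · have := ih (p + 1) (p + 1) (ss ++ [PySem.List.slice cs (some (s : Int)) (some (p : Int))])
        (le_refl _) (by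
        have := congrArg List.tail hd
        simpa [List.tail_drop] using this)
      have hempty : PySem.List.slice cs (some ((p + 1 : Nat) : Int)) (some ((p + 1 : Nat) : Int)) = [] := by
        rw [PySem.List.slice_natCast]; simp
      rw [hempty] at this
      simp only [henum, List.foldl_cons, h, if_neg, Bool.false_eq_true, not_false_iff, hcast]
      rw [this]
      simp only [pvSegs, h]
      clear ih henum hd
      split <;> simp_all [List.append_assoc]

theorem pvRot_eq (input2 : Int) (w : List Char) (hw : w ≠ [] ∨ input2 ≤ 0) :
    ((PySem.List.pyRange 0 input2 1).foldl
        (fun (t : List Char) (_ : Int) =>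
          match PySem.List.pyGet? t 0 with
          | some c => PySem.List.slice t (some 1) none ++ [c]
          | none => t) w = w)
      = ((0 < input2 ∧ 0 < (w.length : Int)) →
          (PySem.List.slice w (some (PySem.Int.mod input2 w.length)) none ++
            PySem.List.slice w none (some (PySem.Int.mod input2 w.length)) = w)) := by
  by_cases hp : 0 < input2
  · have hw' : w ≠ [] := hw.resolve_right (by omega)
    have hlen : 0 < w.length := List.length_pos_iff.mpr hw'
    -- the rotation fold is List.rotate
    have hfold : ∀ (l : List Int) (t : List Char), t ≠ [] →
        l.foldl (fun (t : List Char) (_ : Int) =>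
          match PySem.List.pyGet? t 0 with
          | some c => PySem.List.slice t (some 1) none ++ [c]
          | none => t) t = t.rotate l.length := by
      intro l
      induction l with
      | nil => intro t ht; simp
      | cons c l ih =>
        intro t ht
        obtain ⟨x, xs, rfl⟩ := List.exists_cons_of_ne_nil ht
        have hstep : (match PySem.List.pyGet? (x :: xs) 0 with
            | some c => PySem.List.slice (x :: xs) (some 1) none ++ [c]
            | none => x :: xs) = xs ++ [x] := by
          simp [PySem.List.slice_from_one]
        have hrot1 : xs ++ [x] = (x :: xs).rotate 1 := by
          simp [List.rotate_cons_succ]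
        simp only [List.foldl_cons, hstep]
        rw [ih (xs ++ [x]) (by simp), hrot1, List.rotate_rotate]
        simp [Nat.add_comm]
    have hlenr : (PySem.List.pyRange 0 input2 1).length = input2.toNat := by
      rw [PySem.List.length_pyRange_one]; simp
    have hk : PySem.Int.mod input2 (w.length : Int) = input2 % (w.length : Int) :=
      PySem.Int.mod_eq_emod_of_pos (by exact_mod_cast hlen)
    have hk0 : 0 ≤ input2 % (w.length : Int) := Int.emod_nonneg _ (by positivity)
    have hklt : input2 % (w.length : Int) < (w.length : Int) :=
      Int.emod_lt_of_pos _ (by exact_mod_cast hlen)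
    have hkn : (input2 % (w.length : Int)).toNat = input2.toNat % w.length := by
      obtain ⟨m, rfl⟩ : ∃ m : Nat, input2 = (m : Int) := ⟨input2.toNat, by omega⟩
      rw [← Int.natCast_mod, Int.toNat_natCast, Int.toNat_natCast]
    have hmlt : input2.toNat % w.length < w.length := Nat.mod_lt _ hlen
    rw [hfold _ w hw', hlenr, hk, PySem.List.slice_from _ hk0, PySem.List.slice_to _ hk0, hkn]
    rw [← List.rotate_mod, List.rotate_eq_drop_append_take (Nat.le_of_lt hmlt)]
    simp [hp, hlen]
  · have hr : PySem.List.pyRange 0 input2 1 = [] := by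
      apply List.eq_nil_of_length_eq_zero
      rw [PySem.List.length_pyRange_one]; omega
    rw [hr]
    simp [hp]

theorem pvSegs_ne (cs : List Char) : ∀ t, pvBadAdj cs = false →
    (t = [] → pvNoEmptyWord cs = true) →
    ∀ w ∈ (pvSegs t cs).1, w ≠ [] := by
  induction cs with
  | nil => intro t _ _ w hw; simp [pvSegs] at hw
  | cons c cs ih =>
    intro t hadj hne w hw
    have hadj' : pvBadAdj cs = false := by
      cases cs with
      | nil => rfl
      | cons b rest => simp [pvBadAdj] at hadj; exact hadj.2
    by_cases h : PySem.Chars.isalpha c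
    · simp only [pvSegs, h, if_true] at hw
      exact ih (t ++ [c]) hadj' (by simp) w hw
    · have ht : t ≠ [] := by
        intro ht0
        have := hne ht0
        simp [pvNoEmptyWord, h] at this
      simp only [pvSegs, h] at hw
      simp only [Bool.false_eq_true, if_false, List.mem_cons] at hw
      rcases hw with rfl | hw
      · exact ht
      · refine ih [] hadj' ?_ w hw
        intro _
        cases cs with
        | nil => rfl
        | cons b rest =>
          simp [pvBadAdj, h] at hadj
          simp [pvNoEmptyWord, hadj.1]
          cases rest with
          | nil => rfl
          | cons e r => simp [pvBadAdj] at hadj ⊢; exact hadj.2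

theorem pvWords_nonempty (cs : List Char) (h : pvNoEmptyWord cs = true) :
    ∀ w ∈ pvWords cs, w ≠ [] := by
  have hadj : pvBadAdj cs = false := by
    cases cs with
    | nil => rfl
    | cons c rest => simp [pvNoEmptyWord] at h; simpa using h.2
  intro w hw
  unfold pvWords at hw
  simp only [] at hw
  split at hw
  · rcases List.mem_append.mp hw with hw | hw
    · exact pvSegs_ne cs [] hadj (fun _ => h) w hw
    · simp at hw; subst hw; assumption
  · exact pvSegs_ne cs [] hadj (fun _ => h) w hw

theorem pvA_eq (input1 : String) (input2 : Int) :
    loveletter input1 input2 = (pvWords input1.toList).foldl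
      (fun ans w =>
        let t := (PySem.List.pyRange 0 input2 1).foldl
          (fun (t : List Char) (_ : Int) =>
            match PySem.List.pyGet? t 0 with
            | some c => PySem.List.slice t (some 1) none ++ [c]
            | none => t) w
        if t = w then ans + 1 else ans) 0 := by
  unfold loveletter
  simp only []
  rw [show PySem.Str.len input1 = PySem.List.len input1.toList from by simp [PySem.Str.len]]
  rw [PySem.List.foldl_pyRange_zero_pyGetD input1.toList ' '
      (fun (st : List (List Char) × List Char) c =>
        if PySem.Chars.isalpha c then (st.1, st.2 ++ [c]) else (st.1 ++ [st.2], [])) ([], [])]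
  rw [pvSegs_A_fold]
  unfold pvWords
  simp only [List.nil_append]

theorem pvB_eq (input1 : String) (input2 : Int) :
    loveletter_alt input1 input2 = (pvWords input1.toList).foldl
      (fun ans w =>
        let n : Int := w.length
        if 0 < input2 ∧ 0 < n then
          let k := PySem.Int.mod input2 n
          if PySem.List.slice w (some k) none ++ PySem.List.slice w none (some k) = w then ans + 1
          else ans
        else ans + 1) 0 := by
  unfold loveletter_alt
  simp only []
  have h := pvSegs_B_fold input1.toList input1.toList 0 0 [] (le_refl 0) (by simp)
  simp only [Nat.cast_zero] at h
  have hempty : PySem.List.slice input1.toList (some (0 : Int)) (some (0 : Int)) = [] := by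
    rw [show (0 : Int) = ((0 : Nat) : Int) from by simp, PySem.List.slice_natCast]
    simp
  rw [hempty] at h
  refine congrArg (fun segs => List.foldl _ (0 : Int) segs) ?_
  rw [h]
  unfold pvWords
  simp only [List.nil_append]

-- ===== VERDICT (by name: the statement is the Claim_ definition above) =====
theorem loveletter_spec : Claim_equal_loveletter := by
  intro input1 input2 _ hpre
  unfold Spec_loveletter
  rw [pvA_eq, pvB_eq]
  apply PySem.List.foldl_congr_mem
  intro ans w hw
  simp only []
  by_cases hp : 0 < input2
  · have hwne : w ≠ [] := pvWords_nonempty _ (hpre hp) w hw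
    have hlen : 0 < (w.length : Int) := by
      exact_mod_cast List.length_pos_iff.mpr hwne
    have h := pvRot_eq input2 w (Or.inl hwne)
    rw [if_pos (show 0 < input2 ∧ 0 < (w.length : Int) from ⟨hp, hlen⟩)]
    by_cases hs : PySem.List.slice w (some (PySem.Int.mod input2 (w.length : Int))) none ++
        PySem.List.slice w none (some (PySem.Int.mod input2 (w.length : Int))) = w
    · rw [if_pos ((Iff.of_eq h).mpr (fun _ => hs)), if_pos hs]
    · rw [if_neg (fun hf => hs ((Iff.of_eq h).mp hf ⟨hp, hlen⟩)), if_neg hs]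
  · have h := pvRot_eq input2 w (Or.inr (by omega))
    rw [if_pos ((Iff.of_eq h).mpr (fun hc => absurd hc.1 hp)),
        if_neg (show ¬(0 < input2 ∧ 0 < (w.length : Int)) from fun hc => hp hc.1)]

@[simp]
theorem loveletter_raises : Claim_raises_loveletter := by
  unfold Claim_raises_loveletter
  refine ⟨?_, by decide⟩
  intro s k _ ⟨hk, hne⟩ hpre
  simp [hpre hk] at hne
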